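-- pv_equiv track=rewrite | github.com/MaraSchulze/AdventOfCode-2015-Python | puzzles/day14.2.py | award_points
-- ===== SOURCE A (Python) =====
-- def award_points(distances):
--     accumulated_distances = [[sum(distance[:i + 1]) for i in range(len(distance))] for distance in distances]
--     points_table = [[0 for _ in range(len(distance))] for distance in distances]
--     for second in range(len(accumulated_distances[0])):
--         maximum = max([distance[second] for distance in accumulated_distances])
--         for i in range(len(distances)):
--             points_table[i][second] = 1 if accumulated_distances[i][second] == maximum else 0
--     return points_table
-- ===== SOURCE B (Python) =====
-- def award_points(distances):
--     totals = [0] * len(distances)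
--     points = [[0] * len(distance) for distance in distances]
--     for second in range(len(distances[0])):
--         totals = [t + row[second] for t, row in zip(totals, distances)]
--         maximum = max(totals)
--         for p, t in zip(points, totals):
--             p[second] = 1 if t == maximum else 0
--     return points
-- ===== Notes on version B (the rewrite author's own statement) =====
-- stated objective: faster
-- what changed: B makes a single pass over the seconds, keeping running totals per reindeer and writing each second's 0/1 winner marks from those totals, instead of A's prefix-sum table rebuilt by re-summing slices sum(distance[:i+1]); Pre_ excludes only the inputs where A raises IndexError (empty list, or a row shorter than the first), where B raises too.
import Mathlib
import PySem

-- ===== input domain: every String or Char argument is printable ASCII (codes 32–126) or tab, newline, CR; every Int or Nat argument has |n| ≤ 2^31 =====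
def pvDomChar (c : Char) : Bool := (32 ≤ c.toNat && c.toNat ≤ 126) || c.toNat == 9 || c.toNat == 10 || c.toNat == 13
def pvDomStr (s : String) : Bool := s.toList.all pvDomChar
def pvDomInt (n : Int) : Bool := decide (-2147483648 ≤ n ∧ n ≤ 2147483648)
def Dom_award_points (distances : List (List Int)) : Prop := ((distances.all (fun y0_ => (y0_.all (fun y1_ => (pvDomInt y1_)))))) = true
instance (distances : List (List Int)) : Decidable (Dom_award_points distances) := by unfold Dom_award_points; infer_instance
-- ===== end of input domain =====

-- B replaces A's slice-resumming prefix table and index-wise table mutation by one pass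
-- with running totals, appending a 0/1 column per second (O(n*T) instead of O(n*T^2)).

-- ===== PORT A =====
-- literal transliteration of A; indices produced by range are nonnegative, so
-- pySetD/pyGet? with .getD are exact on the inputs Pre_ admits
def award_points (distances : List (List Int)) : List (List Int) :=
  let acc := distances.map (fun d =>
    (PySem.List.pyRange 0 (d.length : Int) 1).map
      (fun i => (PySem.List.slice d none (some (i + 1))).sum))
  let pts0 := distances.map (fun d =>
    (PySem.List.pyRange 0 (d.length : Int) 1).map (fun _ => (0 : Int)))
  (PySem.List.pyRange 0 (((PySem.List.pyGet? acc 0).getD []).length : Int) 1).foldl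
    (fun pts s =>
      let m := (PySem.List.max? (acc.map (fun row => (PySem.List.pyGet? row s).getD 0))
                  (fun y => y)).getD 0
      (PySem.List.pyRange 0 (distances.length : Int) 1).foldl
        (fun pts i =>
          PySem.List.pySetD pts i
            (PySem.List.pySetD ((PySem.List.pyGet? pts i).getD []) s
              (if (PySem.List.pyGet? ((PySem.List.pyGet? acc i).getD []) s).getD 0 = m
               then (1 : Int) else 0)))
        pts)
    pts0

-- ===== PORT B =====
-- literal transliteration of Source B (running totals per reindeer; a preallocated zero
-- table whose entries for the current second are overwritten in place each pass)
def award_points_alt (distances : List (List Int)) : List (List Int) :=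
  let points0 := distances.map (fun distance => List.replicate distance.length (0 : Int))
  let st := (PySem.List.pyRange 0 (((PySem.List.pyGet? distances 0).getD []).length : Int) 1).foldl
    (fun st s =>
      let totals := List.zipWith (fun t row => t + (PySem.List.pyGet? row s).getD 0)
        st.1 distances
      let m := (PySem.List.max? totals (fun y => y)).getD 0
      (totals, List.zipWith (fun p t => PySem.List.pySetD p s (if t = m then (1 : Int) else 0))
        st.2 totals))
    (List.replicate distances.length (0 : Int), points0)
  st.2

-- ===== PRECONDITION & SPEC =====
-- Pre_ excludes exactly the inputs on which A raises IndexError: the empty list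
-- (distances[0]) and inputs with a row shorter than the first row (indexing it at a
-- second it does not have); B raises there too.
def Pre_award_points (distances : List (List Int)) : Prop :=
  distances ≠ [] ∧ ∀ d ∈ distances, (distances.headD []).length ≤ d.length
instance (distances : List (List Int)) : Decidable (Pre_award_points distances) := by
  unfold Pre_award_points; infer_instance
def pvWitness_award_points : List (List Int) := [[1, 2], [2, 1]]
def Spec_award_points (distances : List (List Int)) (out : List (List Int)) : Prop :=
  out = award_points_alt distances
instance (distances : List (List Int)) (out : List (List Int)) :
    Decidable (Spec_award_points distances out) := by unfold Spec_award_points; infer_instance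

-- ===== CLAIM (what is proved, stated in full; the proofs are below) =====
def Claim_equal_award_points : Prop := ∀ (distances : List (List Int)),
  Dom_award_points distances → Pre_award_points distances →
    Spec_award_points distances (award_points distances)

-- ===== LEMMAS AND PROOFS =====

-- maximum accumulated distance over all reindeer after second j (Python's max(...))
def pvColMax (l : List (List Int)) (j : Nat) : Int :=
  (PySem.List.max? (l.map (fun d => (d.take (j + 1)).sum)) (fun y => y)).getD 0

-- the 0/1 point entry for row d at second j
def pvChi (l : List (List Int)) (d : List Int) (j : Nat) : Int :=
  if (d.take (j + 1)).sum = pvColMax l j then 1 else 0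

lemma pyGetD0 {α : Type} (xs : List α) (t : Nat) (a : α) (h : t < xs.length) :
    (PySem.List.pyGet? xs (t : Int)).getD a = xs[t] := by
  rw [PySem.List.pyGet?_ofNat xs t h]; rfl

-- A's prefix-sum row, characterized
lemma accRow_eq (d : List Int) :
    (PySem.List.pyRange 0 (d.length : Int) 1).map
        (fun i => (PySem.List.slice d none (some (i + 1))).sum)
      = (List.range d.length).map (fun j => (d.take (j + 1)).sum) := by
  rw [PySem.List.pyRange_one]
  simp only [List.map_map, Int.sub_zero, Int.toNat_natCast]
  refine List.map_congr_left (fun k _ => ?_)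
  have h1 : (0 : Int) + (k : Int) + 1 = ((k + 1 : Nat) : Int) := by push_cast; ring
  simp only [Function.comp_apply, h1, PySem.List.slice_to_natCast]

-- A's zero table row, characterized
lemma pts0_eq (n : Nat) :
    (PySem.List.pyRange 0 (n : Int) 1).map (fun _ => (0 : Int))
      = (List.range n).map (fun _ => (0 : Int)) := by
  apply List.ext_getElem (by simp)
  intro j h1 h2
  simp

lemma accRow_get (d : List Int) (t : Nat) (h : t < d.length) :
    (PySem.List.pyGet? ((List.range d.length).map (fun j => (d.take (j + 1)).sum))
        (t : Int)).getD 0 = (d.take (t + 1)).sum := by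
  rw [pyGetD0 _ t 0 (by simpa using h)]
  simp [h]

lemma zipWith_map_self {α β γ : Type} (f : β → α → γ) (g : α → β) (l : List α) :
    List.zipWith f (l.map g) l = l.map (fun a => f (g a) a) := by
  induction l with
  | nil => rfl
  | cons a t ih => simp [ih]

lemma set_pattern (l : List (List Int)) (d : List Int) (t : Nat) (_h : t < d.length) :
    ((List.range d.length).map (fun j => if j < t then pvChi l d j else 0)).set t (pvChi l d t)
      = (List.range d.length).map (fun j => if j < t + 1 then pvChi l d j else 0) := by
  apply List.ext_getElem (by simp)
  intro j h1 h2
  simp only [List.length_set, List.length_map, List.length_range] at h1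
  rw [List.getElem_set]
  simp only [List.getElem_map, List.getElem_range]
  split_ifs with h3 h4 h5 h5 <;> first | rfl | (subst h3; omega) | omega

-- A's inner index loop "for i in range(n): pts[i][s] = v(i)" as a mapIdx
lemma innerA (v : Int → Int) (s : Int) (n : Nat) :
    ∀ (m k : Nat) (P : List (List Int)), P.length = n → n = k + m →
      (PySem.List.pyRange (k : Int) (n : Int) 1).foldl
          (fun acc i => PySem.List.pySetD acc i
            (PySem.List.pySetD ((PySem.List.pyGet? acc i).getD []) s (v i))) P
        = P.mapIdx (fun i row => if k ≤ i then PySem.List.pySetD row s (v (i : Int)) else row) := by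
  intro m
  induction m with
  | zero =>
    intro k P hP hk
    rw [PySem.List.pyRange_one_eq_nil (by omega), List.foldl_nil]
    apply Eq.symm
    apply List.ext_getElem (by simp)
    intro j h1 h2
    simp only [List.getElem_mapIdx]
    rw [if_neg (by omega)]
  | succ m ih =>
    intro k P hP hk
    have hkn : (k : Int) < (n : Int) := by omega
    rw [PySem.List.pyRange_one_cons hkn, List.foldl_cons]
    have hk1 : ((k : Int) + 1) = ((k + 1 : Nat) : Int) := by push_cast; ring
    have hPk : k < P.length := by omega
    have hget : (PySem.List.pyGet? P (k : Int)).getD [] = P[k] := pyGetD0 P k [] hPk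
    rw [hget, PySem.List.pySetD_natCast, hk1,
        ih (k + 1) (P.set k (PySem.List.pySetD P[k] s (v (k : Int)))) (by simp [hP]) (by omega)]
    apply List.ext_getElem (by simp)
    intro j h1 h2
    simp only [List.length_mapIdx, List.length_set] at h1 h2
    simp only [List.getElem_mapIdx, List.getElem_set]
    by_cases hjk : j = k
    · subst hjk
      rw [if_pos rfl, if_neg (by omega), if_pos (by omega)]
    · rw [if_neg (Ne.symm hjk)]
      split_ifs <;> first | rfl | omega

lemma innerA0 (v : Int → Int) (s : Int) (n : Nat) (P : List (List Int)) (hP : P.length = n) :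
    (PySem.List.pyRange 0 (n : Int) 1).foldl
        (fun acc i => PySem.List.pySetD acc i
          (PySem.List.pySetD ((PySem.List.pyGet? acc i).getD []) s (v i))) P
      = P.mapIdx (fun i row => PySem.List.pySetD row s (v (i : Int))) := by
  have h := innerA v s n n 0 P hP (by omega)
  rw [show ((0 : Nat) : Int) = 0 from rfl] at h
  rw [h]
  apply List.ext_getElem (by simp)
  intro j h1 h2
  simp [List.getElem_mapIdx]

lemma mapIdx_map (l : List (List Int)) (φ ψ : List Int → List Int)
    (g : Nat → List Int → List Int)
    (h : ∀ i (hi : i < l.length), g i (φ l[i]) = ψ l[i]) :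
    (l.map φ).mapIdx g = l.map ψ := by
  apply List.ext_getElem (by simp)
  intro j h1 h2
  simp only [List.length_mapIdx, List.length_map] at h1 h2
  simp only [List.getElem_mapIdx, List.getElem_map]
  exact h j h2

-- zipWith of two maps of the same list is a map
lemma zipWith_map_map {α β γ δ : Type} (f : β → γ → δ) (g : α → β) (h : α → γ) (l : List α) :
    List.zipWith f (l.map g) (l.map h) = l.map (fun a => f (g a) (h a)) := by
  induction l with
  | nil => rfl
  | cons a t ih => simp [ih]

-- loop invariant for B: after t seconds, totals are prefix sums and columns < t of
-- the points table carry the winner marks, the rest still 0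
lemma B_loop (l : List (List Int)) (T : Nat) (hu : ∀ d ∈ l, T ≤ d.length) :
    ∀ (t : Nat), t ≤ T →
      ((PySem.List.pyRange 0 (t : Int) 1).foldl
        (fun st s =>
          (List.zipWith (fun t row => t + (PySem.List.pyGet? row s).getD 0) st.1 l,
           List.zipWith (fun p t => PySem.List.pySetD p s
               (if t = (PySem.List.max?
                   (List.zipWith (fun t row => t + (PySem.List.pyGet? row s).getD 0) st.1 l)
                   (fun y => y)).getD 0
                then (1 : Int) else 0))
             st.2 (List.zipWith (fun t row => t + (PySem.List.pyGet? row s).getD 0) st.1 l)))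
        (List.replicate l.length (0 : Int),
         l.map (fun distance => List.replicate distance.length (0 : Int))))
      = (l.map (fun d => (d.take t).sum),
         l.map (fun d => (List.range d.length).map
           (fun j => if j < t then pvChi l d j else 0))) := by
  intro t
  induction t with
  | zero =>
    intro _
    rw [Nat.cast_zero, PySem.List.pyRange_one_eq_nil (le_refl 0), List.foldl_nil]
    refine Prod.ext ?_ ?_
    · simp [List.map_const']
    · refine List.map_congr_left (fun d _ => ?_)
      apply List.ext_getElem (by simp)
      intro j h1 h2
      simp
  | succ t ih =>
    intro ht
    have hc : ((t + 1 : Nat) : Int) = (t : Int) + 1 := by push_cast; ring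
    rw [hc, PySem.List.pyRange_one_succ_right (by omega), List.foldl_append,
        ih (by omega), List.foldl_cons, List.foldl_nil]
    have htot : List.zipWith (fun a row => a + (PySem.List.pyGet? row (t : Int)).getD 0)
        (l.map (fun d => (d.take t).sum)) l = l.map (fun d => (d.take (t + 1)).sum) := by
      rw [zipWith_map_self]
      refine List.map_congr_left (fun d hd => ?_)
      have hlen : t < d.length := by have := hu d hd; omega
      rw [pyGetD0 d t 0 hlen, List.sum_take_succ d t hlen]
    dsimp only
    rw [htot]
    refine Prod.ext rfl ?_
    dsimp only
    rw [zipWith_map_map]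
    refine List.map_congr_left (fun d hd => ?_)
    have hlen : t < d.length := by have := hu d hd; omega
    have hm : (PySem.List.max? (l.map (fun d => (d.take (t + 1)).sum)) (fun y => y)).getD 0
        = pvColMax l t := rfl
    rw [hm, PySem.List.pySetD_natCast]
    exact set_pattern l d t hlen

-- loop invariant for A: after t seconds, columns < t carry points, the rest still 0
lemma A_loop (l : List (List Int)) (T : Nat) (hu : ∀ d ∈ l, T ≤ d.length) :
    ∀ (t : Nat), t ≤ T →
      (PySem.List.pyRange 0 (t : Int) 1).foldl
        (fun pts s =>
          (PySem.List.pyRange 0 (l.length : Int) 1).foldl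
            (fun pts i =>
              PySem.List.pySetD pts i
                (PySem.List.pySetD ((PySem.List.pyGet? pts i).getD []) s
                  (if (PySem.List.pyGet?
                        ((PySem.List.pyGet?
                          (l.map (fun d => (List.range d.length).map
                            (fun j => (d.take (j + 1)).sum))) i).getD []) s).getD 0
                      = (PySem.List.max?
                          ((l.map (fun d => (List.range d.length).map
                            (fun j => (d.take (j + 1)).sum))).map
                            (fun row => (PySem.List.pyGet? row s).getD 0)) (fun y => y)).getD 0
                   then (1 : Int) else 0)))
            pts)
        (l.map (fun d => (List.range d.length).map (fun _ => (0 : Int))))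
      = l.map (fun d => (List.range d.length).map
          (fun j => if j < t then pvChi l d j else 0)) := by
  intro t
  induction t with
  | zero =>
    intro _
    rw [Nat.cast_zero, PySem.List.pyRange_one_eq_nil (le_refl 0), List.foldl_nil]
    refine List.map_congr_left (fun d _ => List.map_congr_left (fun j _ => by simp))
  | succ t ih =>
    intro h
    have hc : ((t + 1 : Nat) : Int) = (t : Int) + 1 := by push_cast; ring
    rw [hc, PySem.List.pyRange_one_succ_right (by omega), List.foldl_append,
        ih (by omega), List.foldl_cons, List.foldl_nil]
    have hm : (PySem.List.max?
        ((l.map (fun d => (List.range d.length).map (fun j => (d.take (j + 1)).sum))).map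
          (fun row => (PySem.List.pyGet? row (t : Int)).getD 0)) (fun y => y)).getD 0
        = pvColMax l t := by
      rw [List.map_map]
      unfold pvColMax
      congr 1
      congr 1
      refine List.map_congr_left (fun d hd => ?_)
      have hlen : t < d.length := by have := hu d hd; omega
      exact accRow_get d t hlen
    rw [hm, innerA0 _ (t : Int) l.length _ (by simp)]
    refine mapIdx_map l _ _ _ (fun i hi => ?_)
    have hlen : t < l[i].length := by have := hu l[i] (l.getElem_mem hi); omega
    have hv : (if (PySem.List.pyGet?
          ((PySem.List.pyGet?
            (l.map (fun d => (List.range d.length).map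
              (fun j => (d.take (j + 1)).sum))) (i : Int)).getD []) (t : Int)).getD 0
            = pvColMax l t then (1 : Int) else 0) = pvChi l l[i] t := by
      rw [pyGetD0 _ i [] (by simpa using hi)]
      simp only [List.getElem_map]
      rw [accRow_get l[i] t hlen]
      rfl
    rw [hv, PySem.List.pySetD_natCast, set_pattern l l[i] t hlen]

-- ===== VERDICT (by name: the statement is the Claim_ definition above) =====
theorem award_points_spec : Claim_equal_award_points := by
  intro distances _ hPre
  obtain ⟨hne, hu⟩ := hPre
  obtain ⟨d0, rest, rfl⟩ : ∃ d0 rest, distances = d0 :: rest := by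
    cases distances with
    | nil => exact absurd rfl hne
    | cons a t => exact ⟨a, t, rfl⟩
  set l := d0 :: rest with hl
  have hu' : ∀ d ∈ l, d0.length ≤ d.length := by
    intro d hd
    simpa using hu d hd
  unfold Spec_award_points award_points award_points_alt
  simp only [accRow_eq, pts0_eq]
  have hget0A : (PySem.List.pyGet?
      (l.map (fun d => (List.range d.length).map (fun j => (d.take (j + 1)).sum))) (0 : Int)).getD []
      = (List.range d0.length).map (fun j => (d0.take (j + 1)).sum) := by
    rw [show ((0 : Int)) = ((0 : Nat) : Int) from rfl, pyGetD0 _ 0 [] (by simp [hl])]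
    simp [hl]
  have hget0B : (PySem.List.pyGet? l (0 : Int)).getD [] = d0 := by
    rw [show ((0 : Int)) = ((0 : Nat) : Int) from rfl, pyGetD0 _ 0 [] (by simp [hl])]
    simp [hl]
  rw [hget0A, hget0B]
  have hlenA : ((List.range d0.length).map (fun j => (d0.take (j + 1)).sum)).length
      = d0.length := by simp
  rw [hlenA]
  rw [A_loop l d0.length hu' d0.length (le_refl _),
      congrArg Prod.snd (B_loop l d0.length hu' d0.length (le_refl _))]
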